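-- pv_equiv track=rewrite | github.com/Zranshi/leetcode | my-code/407/main.py | trapRainWater
-- ===== SOURCE A (Python) =====
-- def trapRainWater(heightMap: list[list[int]]) -> int:
--     m, n = len(heightMap), len(heightMap[0])
--     maxHeight = max(max(row) for row in heightMap)
--     water = [[maxHeight for _ in range(n)] for _ in range(m)]
--     dirs = [-1, 0, 1, 0, -1]
--
--     qu = []
--     for i in range(m):
--         for j in range(n):
--             if i == 0 or i == m - 1 or j == 0 or j == n - 1:
--                 if water[i][j] > heightMap[i][j]:
--                     water[i][j] = heightMap[i][j]
--                     qu.append([i, j])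
--
--     while len(qu) > 0:
--         [x, y] = qu.pop(0)
--         for i in range(4):
--             nx, ny = x + dirs[i], y + dirs[i + 1]
--             if nx < 0 or nx >= m or ny < 0 or ny >= n:
--                 continue
--             if water[x][y] < water[nx][ny] and water[nx][ny] > heightMap[nx][ny]:
--                 water[nx][ny] = max(water[x][y], heightMap[nx][ny])
--                 qu.append([nx, ny])
--
--     ans = 0
--     for i in range(m):
--         for j in range(n):
--             ans = ans + water[i][j] - heightMap[i][j]
--     return ans
-- ===== SOURCE B (Python) =====
-- def trapRainWater(heightMap: list[list[int]]) -> int: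
--     # Gauss-Seidel relaxation sweeps (alternating direction) instead of A's BFS worklist.
--     m, n = len(heightMap), len(heightMap[0])
--     top = max(max(row) for row in heightMap)
--     level = [[heightMap[i][j] if i == 0 or i == m - 1 or j == 0 or j == n - 1 else top
--               for j in range(n)] for i in range(m)]
--     forward = True
--     changed = True
--     while changed:
--         changed = False
--         rows = range(1, m - 1) if forward else range(m - 2, 0, -1)
--         cols = range(1, n - 1) if forward else range(n - 2, 0, -1)
--         for i in rows:
--             for j in cols:
--                 nv = max(heightMap[i][j],
--                          min(min(min(level[i - 1][j], level[i + 1][j]),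
--                                  level[i][j - 1]), level[i][j + 1]))
--                 if nv < level[i][j]:
--                     level[i][j] = nv
--                     changed = True
--         forward = not forward
--     return sum(level[i][j] - heightMap[i][j] for i in range(m) for j in range(n))
-- ===== Notes on version B (the rewrite author's own statement) =====
-- stated objective: alternative
-- what changed: Replaced A's BFS worklist (queue of cells, pop-from-front, per-edge relaxations) by queue-free Gauss-Seidel relaxation: whole-grid sweeps of alternating direction that lower each interior cell to max(height, min of its four neighbours) until a sweep changes nothing.
import Mathlib
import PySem

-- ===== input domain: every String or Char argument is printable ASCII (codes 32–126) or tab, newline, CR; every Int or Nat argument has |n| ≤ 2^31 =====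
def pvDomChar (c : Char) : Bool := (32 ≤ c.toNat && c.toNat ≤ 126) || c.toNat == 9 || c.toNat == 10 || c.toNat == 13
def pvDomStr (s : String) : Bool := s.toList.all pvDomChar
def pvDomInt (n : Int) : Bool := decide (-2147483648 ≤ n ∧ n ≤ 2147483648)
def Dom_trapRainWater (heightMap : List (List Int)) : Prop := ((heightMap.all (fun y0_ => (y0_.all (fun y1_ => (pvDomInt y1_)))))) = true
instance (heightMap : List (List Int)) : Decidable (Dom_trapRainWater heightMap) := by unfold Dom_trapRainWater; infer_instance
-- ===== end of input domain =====

-- B replaces A's BFS worklist by queue-free Gauss-Seidel relaxation sweeps (alternative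
-- algorithm, same exact result); equivalence is about the return value (neither port mutates its argument).

-- ===== PORT A =====
-- shared grid primitives: water[i][j] read / write (indices always in range where used)
def pvCell (w : List (List Int)) (i j : Nat) : Int := (w.getD i []).getD j 0

def pvSet (w : List (List Int)) (i j : Nat) (v : Int) : List (List Int) :=
  w.set i ((w.getD i []).set j v)

-- max(row) for a nonempty row (exact: foldl of max over the row, seeded with its first element)
def pvRowMax (row : List Int) : Int := row.foldl max (row.getD 0 0)

-- max(max(row) for row in heightMap) for a nonempty map
def pvTop (hm : List (List Int)) : Int :=
  (hm.map pvRowMax).foldl max ((hm.map pvRowMax).getD 0 0)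

-- potential used only to pre-compute sufficient fuel for the while-loops
def pvPhi (hm : List (List Int)) (m n : Nat) (w : List (List Int)) : Int :=
  ∑ i ∈ Finset.range m, ∑ j ∈ Finset.range n, (pvCell w i j - pvCell hm i j)

-- body of A's boundary-initialisation double loop
def pvInitStep (hm : List (List Int)) (m n : Nat)
    (st : List (List Int) × List (Nat × Nat)) (c : Nat × Nat) :
    List (List Int) × List (Nat × Nat) :=
  if c.1 = 0 ∨ c.1 = m - 1 ∨ c.2 = 0 ∨ c.2 = n - 1 then
    if pvCell hm c.1 c.2 < pvCell st.1 c.1 c.2 then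
      (pvSet st.1 c.1 c.2 (pvCell hm c.1 c.2), st.2 ++ [c])
    else st
  else st

def pvInitA (hm : List (List Int)) (m n : Nat) (top : Int) :
    List (List Int) × List (Nat × Nat) :=
  (List.range m).foldl
    (fun st i => (List.range n).foldl (fun st j => pvInitStep hm m n st (i, j)) st)
    (List.replicate m (List.replicate n top), [])

def pvDirs : List Int := [-1, 0, 1, 0, -1]

-- one step of A's `for i in range(4)` neighbour relaxation from popped cell (x,y)
def pvRelax (hm : List (List Int)) (m n x y : Nat)
    (st : List (List Int) × List (Nat × Nat)) (i : Nat) :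
    List (List Int) × List (Nat × Nat) :=
  let nx : Int := (x : Int) + pvDirs.getD i 0
  let ny : Int := (y : Int) + pvDirs.getD (i + 1) 0
  if nx < 0 ∨ (m : Int) ≤ nx ∨ ny < 0 ∨ (n : Int) ≤ ny then st
  else
    let a := nx.toNat
    let b := ny.toNat
    if pvCell st.1 x y < pvCell st.1 a b ∧ pvCell hm a b < pvCell st.1 a b then
      (pvSet st.1 a b (max (pvCell st.1 x y) (pvCell hm a b)), st.2 ++ [(a, b)])
    else st

-- A's `while len(qu) > 0` loop (fuel is pre-computed and provably sufficient)
def pvLoopA (hm : List (List Int)) (m n : Nat) :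
    Nat → List (List Int) × List (Nat × Nat) → List (List Int)
  | 0, st => st.1
  | fuel + 1, st =>
    match st.2 with
    | [] => st.1
    | (x, y) :: rest =>
      pvLoopA hm m n fuel ((List.range 4).foldl (pvRelax hm m n x y) (st.1, rest))

def trapRainWater (heightMap : List (List Int)) : Int :=
  let m := heightMap.length
  let n := (heightMap.getD 0 []).length
  let st := pvInitA heightMap m n (pvTop heightMap)
  let w := pvLoopA heightMap m n (5 * (pvPhi heightMap m n st.1).toNat + st.2.length + 1) st
  (List.range m).foldl
    (fun ans i => (List.range n).foldl (fun ans j => ans + pvCell w i j - pvCell heightMap i j) ans) 0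

-- ===== PORT B =====
-- min(level[i-1][j], level[i+1][j], level[i][j-1], level[i][j+1]) (Python's 4-ary min, left-assoc)
def pvMin4 (w : List (List Int)) (i j : Nat) : Int :=
  min (min (min (pvCell w (i - 1) j) (pvCell w (i + 1) j)) (pvCell w i (j - 1))) (pvCell w i (j + 1))

-- body of B's per-cell relaxation
def pvCellStep (hm : List (List Int)) (st : List (List Int) × Bool) (i j : Nat) :
    List (List Int) × Bool :=
  let nv := max (pvCell hm i j) (pvMin4 st.1 i j)
  if nv < pvCell st.1 i j then (pvSet st.1 i j nv, true) else st

-- one full sweep over the interior (forward or backward order), `changed` starts False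
def pvSweep (hm : List (List Int)) (m n : Nat) (fwd : Bool) (w : List (List Int)) :
    List (List Int) × Bool :=
  let rows := if fwd then List.range' 1 (m - 1 - 1) else (List.range' 1 (m - 1 - 1)).reverse
  let cols := if fwd then List.range' 1 (n - 1 - 1) else (List.range' 1 (n - 1 - 1)).reverse
  rows.foldl (fun st i => cols.foldl (fun st j => pvCellStep hm st i j) st) (w, false)

-- B's `while changed` loop, alternating sweep direction (fuel provably sufficient)
def pvLoopB (hm : List (List Int)) (m n : Nat) : Nat → Bool → List (List Int) → List (List Int)
  | 0, _, w => w
  | fuel + 1, fwd, w =>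
    let st := pvSweep hm m n fwd w
    if st.2 then pvLoopB hm m n fuel (!fwd) st.1 else st.1

def trapRainWater_alt (heightMap : List (List Int)) : Int :=
  let m := heightMap.length
  let n := (heightMap.getD 0 []).length
  let top := pvTop heightMap
  let w0 := (List.range m).map (fun i => (List.range n).map (fun j =>
      if i = 0 ∨ i = m - 1 ∨ j = 0 ∨ j = n - 1 then pvCell heightMap i j else top))
  let w := pvLoopB heightMap m n ((pvPhi heightMap m n w0).toNat + 1) true w0
  ((List.range m).map (fun i =>
    ((List.range n).map (fun j => pvCell w i j - pvCell heightMap i j)).sum)).sum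

-- ===== PRECONDITION & SPEC =====
-- Pre_ = exactly the inputs where Python A returns: a nonempty grid with a nonempty first
-- row and every row at least as long as the first (otherwise A raises IndexError/ValueError).
def Pre_trapRainWater (heightMap : List (List Int)) : Prop :=
  0 < heightMap.length ∧ 0 < (heightMap.getD 0 []).length ∧
    ∀ row ∈ heightMap, (heightMap.getD 0 []).length ≤ row.length

instance (heightMap : List (List Int)) : Decidable (Pre_trapRainWater heightMap) := by
  unfold Pre_trapRainWater; infer_instance

def pvWitness_trapRainWater : List (List Int) := [[3, 3, 3], [3, 1, 3], [3, 3, 3]]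

def Spec_trapRainWater (heightMap : List (List Int)) (out : Int) : Prop :=
  out = trapRainWater_alt heightMap
instance (heightMap : List (List Int)) (out : Int) : Decidable (Spec_trapRainWater heightMap out) := by
  unfold Spec_trapRainWater; infer_instance

-- ===== CLAIM (what is proved, stated in full; the proofs are below) =====
def Claim_equal_trapRainWater : Prop :=
  ∀ (heightMap : List (List Int)), Dom_trapRainWater heightMap →
    Pre_trapRainWater heightMap → Spec_trapRainWater heightMap (trapRainWater heightMap)

-- ===== LEMMAS AND PROOFS =====

-- grid predicates
def pvShape (m n : Nat) (w : List (List Int)) : Prop :=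
  w.length = m ∧ ∀ row ∈ w, row.length = n

def pvAdj (m n x y x' y' : Nat) : Prop :=
  x < m ∧ y < n ∧ x' < m ∧ y' < n ∧
    ((x = x' + 1 ∧ y = y') ∨ (x + 1 = x' ∧ y = y') ∨ (x = x' ∧ y = y' + 1) ∨ (x = x' ∧ y + 1 = y'))

def pvQuies (hm : List (List Int)) (m n : Nat) (w : List (List Int)) : Prop :=
  ∀ x y x' y', pvAdj m n x y x' y' → pvCell w x' y' ≤ max (pvCell w x y) (pvCell hm x' y')

def pvLe (m n : Nat) (v w : List (List Int)) : Prop :=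
  ∀ i j, i < m → j < n → pvCell v i j ≤ pvCell w i j

def pvAbove (hm : List (List Int)) (m n : Nat) (w : List (List Int)) : Prop :=
  ∀ i j, i < m → j < n → pvCell hm i j ≤ pvCell w i j

def pvViol (hm w : List (List Int)) (x y x' y' : Nat) : Prop :=
  pvCell w x y < pvCell w x' y' ∧ pvCell hm x' y' < pvCell w x' y'

def pvVInv (hm : List (List Int)) (m n : Nat) (w : List (List Int)) (qu : List (Nat × Nat)) : Prop :=
  ∀ x y x' y', pvAdj m n x y x' y' → pvViol hm w x y x' y' → (x, y) ∈ qu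

def pvQIn (m n : Nat) (qu : List (Nat × Nat)) : Prop := ∀ c ∈ qu, c.1 < m ∧ c.2 < n

abbrev pvBdry (m n i j : Nat) : Prop := i = 0 ∨ i = m - 1 ∨ j = 0 ∨ j = n - 1

def pvBInv (hm : List (List Int)) (m n : Nat) (w : List (List Int)) : Prop :=
  ∀ i j, i < m → j < n → pvBdry m n i j → pvCell w i j = pvCell hm i j

def pvE (hm : List (List Int)) (m n : Nat) (top : Int) (i j : Nat) : Int :=
  if pvBdry m n i j ∧ pvCell hm i j < top then pvCell hm i j else top

def pvLQ (hm w : List (List Int)) (i j : Nat) : Prop :=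
  pvCell w i j ≤ max (pvCell hm i j) (pvMin4 w i j)

def pvAllCells (m n : Nat) : List (Nat × Nat) :=
  (List.range m).flatMap (fun i => (List.range n).map (fun j => (i, j)))

def pvIntCells (m n : Nat) (fwd : Bool) : List (Nat × Nat) :=
  (if fwd then List.range' 1 (m - 1 - 1) else (List.range' 1 (m - 1 - 1)).reverse).flatMap
    (fun i => (if fwd then List.range' 1 (n - 1 - 1) else (List.range' 1 (n - 1 - 1)).reverse).map
      (fun j => (i, j)))

-- generic fold lemmas
theorem pvFoldl_inv {α β : Type} (P : β → Prop) (f : β → α → β) (l : List α)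
    (h : ∀ b a, a ∈ l → P b → P (f b a)) (b : β) (hb : P b) : P (l.foldl f b) := by
  induction l generalizing b with
  | nil => exact hb
  | cons a t ih =>
    exact ih (fun b a' ha' hb' => h b a' (List.mem_cons_of_mem _ ha') hb')
      (f b a) (h b a (List.mem_cons_self) hb)

theorem pvFoldl_flatMap {α β γ : Type} (f : γ → β → γ) (g : α → List β) (l : List α) (b : γ) :
    (l.flatMap g).foldl f b = l.foldl (fun b a => (g a).foldl f b) b := by
  induction l generalizing b with
  | nil => rfl
  | cons a t ih => simp [List.flatMap_cons, List.foldl_append, ih]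

theorem pvFoldl_establish {α β : Type} (G : β → Prop) (P : α → β → Prop) (f : β → α → β)
    (l : List α)
    (hG : ∀ b a, a ∈ l → G b → G (f b a))
    (hEst : ∀ b a, a ∈ l → G b → P a (f b a))
    (hStable : ∀ b a a', a ∈ l → a' ∈ l → G b → P a b → P a (f b a'))
    (b : β) (hb : G b) : G (l.foldl f b) ∧ ∀ a ∈ l, P a (l.foldl f b) := by
  induction l generalizing b with
  | nil => exact ⟨hb, by simp⟩
  | cons a t ih =>
    have hmem : ∀ a' ∈ t, a' ∈ a :: t := fun a' h => List.mem_cons_of_mem _ h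
    have h1 : G (f b a) := hG b a (List.mem_cons_self) hb
    have ihr := ih (fun b a' ha' => hG b a' (hmem _ ha'))
      (fun b a' ha' => hEst b a' (hmem _ ha'))
      (fun b a' a'' ha' ha'' => hStable b a' a'' (hmem _ ha') (hmem _ ha''))
      (f b a) h1
    refine ⟨ihr.1, ?_⟩
    intro a' ha'
    rcases List.mem_cons.1 ha' with h' | ha'
    · subst h'
      have : G (t.foldl f (f b a')) ∧ P a' (t.foldl f (f b a')) :=
        pvFoldl_inv (fun s => G s ∧ P a' s) f t
          (fun s a'' ha'' hs => ⟨hG s a'' (hmem _ ha'') hs.1,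
            hStable s a' a'' List.mem_cons_self (hmem _ ha'') hs.1 hs.2⟩)
          (f b a') ⟨h1, hEst b a' List.mem_cons_self hb⟩
      exact this.2
    · exact ihr.2 a' ha'

-- cell / set basics
theorem pvCell_set_self {m n : Nat} {w : List (List Int)} (hs : pvShape m n w)
    {i j : Nat} (hi : i < m) (hj : j < n) (v : Int) : pvCell (pvSet w i j v) i j = v := by
  obtain ⟨hl, hr⟩ := hs
  have hiw : i < w.length := by omega
  have hmemrow : w.getD i [] ∈ w := by
    rw [List.getD_eq_getElem _ _ hiw]; exact List.getElem_mem hiw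
  have hrow : (w.getD i []).length = n := hr _ hmemrow
  have hjr : j < (w.getD i []).length := by omega
  have hjr' : j < (w[i]'hiw).length := by rwa [List.getD_eq_getElem _ _ hiw] at hjr
  simp [pvCell, pvSet, List.getD, List.getElem?_set, hiw, hjr']

theorem pvCell_set_ne {w : List (List Int)} {i j i' j' : Nat} (h : i ≠ i' ∨ j ≠ j') (v : Int) :
    pvCell (pvSet w i j v) i' j' = pvCell w i' j' := by
  rcases h with h | h
  · simp [pvCell, pvSet, List.getD, List.getElem?_set, h]
  · by_cases hii : i = i'
    · subst hii
      by_cases hiw : i < w.length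
      · simp [pvCell, pvSet, List.getD, List.getElem?_set, hiw, h]
      · simp [pvCell, pvSet, List.getD, List.getElem?_set, hiw]
    · simp [pvCell, pvSet, List.getD, List.getElem?_set, hii]

theorem pvShape_set {m n : Nat} {w : List (List Int)} (hs : pvShape m n w) {i j : Nat}
    (hi : i < m) (v : Int) : pvShape m n (pvSet w i j v) := by
  obtain ⟨hl, hr⟩ := hs
  refine ⟨by simp [pvSet, hl], ?_⟩
  intro row hrow
  rcases List.mem_or_eq_of_mem_set hrow with h | h
  · exact hr _ h
  · subst h
    have hiw : i < w.length := by omega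
    have hmemrow : w.getD i [] ∈ w := by
      rw [List.getD_eq_getElem _ _ hiw]; exact List.getElem_mem hiw
    simpa using hr _ hmemrow

theorem pvPhi_set {hm : List (List Int)} {m n : Nat} {w : List (List Int)} (hs : pvShape m n w)
    {i j : Nat} (hi : i < m) (hj : j < n) (v : Int) :
    pvPhi hm m n (pvSet w i j v) = pvPhi hm m n w + (v - pvCell w i j) := by
  unfold pvPhi
  have hcd := pvCell_set_self hs hi hj v
  have hmem : i ∈ Finset.range m := Finset.mem_range.2 hi
  have hmemj : j ∈ Finset.range n := Finset.mem_range.2 hj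
  rw [← Finset.add_sum_erase _ _ hmem,
    ← Finset.add_sum_erase _ (fun i => ∑ j ∈ Finset.range n, (pvCell w i j - pvCell hm i j)) hmem]
  have herase : ∑ i' ∈ (Finset.range m).erase i,
      (∑ j' ∈ Finset.range n, (pvCell (pvSet w i j v) i' j' - pvCell hm i' j')) =
      ∑ i' ∈ (Finset.range m).erase i,
      (∑ j' ∈ Finset.range n, (pvCell w i' j' - pvCell hm i' j')) := by
    refine Finset.sum_congr rfl (fun i' hi' => Finset.sum_congr rfl (fun j' _ => ?_))
    have hne : i ≠ i' := fun h => (Finset.mem_erase.1 hi').1 h.symm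
    rw [pvCell_set_ne (Or.inl hne)]
  rw [herase]
  rw [← Finset.add_sum_erase _ _ hmemj,
    ← Finset.add_sum_erase _ (fun j => pvCell w i j - pvCell hm i j) hmemj]
  have herasej : ∑ j' ∈ (Finset.range n).erase j, (pvCell (pvSet w i j v) i j' - pvCell hm i j') =
      ∑ j' ∈ (Finset.range n).erase j, (pvCell w i j' - pvCell hm i j') := by
    refine Finset.sum_congr rfl (fun j' hj' => ?_)
    have hne : j ≠ j' := fun h => (Finset.mem_erase.1 hj').1 h.symm
    rw [pvCell_set_ne (Or.inr hne)]
  rw [herasej, hcd]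
  ring

theorem pvPhi_nonneg {hm : List (List Int)} {m n : Nat} {w : List (List Int)}
    (h : pvAbove hm m n w) : 0 ≤ pvPhi hm m n w := by
  refine Finset.sum_nonneg (fun i hi => Finset.sum_nonneg (fun j hj => ?_))
  have := h i j (Finset.mem_range.1 hi) (Finset.mem_range.1 hj)
  omega

theorem pvPhi_congr {hm : List (List Int)} {m n : Nat} {w v : List (List Int)}
    (h : ∀ i j, i < m → j < n → pvCell w i j = pvCell v i j) :
    pvPhi hm m n w = pvPhi hm m n v := by
  refine Finset.sum_congr rfl (fun i hi => Finset.sum_congr rfl (fun j hj => ?_))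
  rw [h i j (Finset.mem_range.1 hi) (Finset.mem_range.1 hj)]

-- max facts
theorem pvLe_foldl_max (l : List Int) (a x : Int) (h : x = a ∨ x ∈ l) : x ≤ l.foldl max a := by
  have seed : ∀ (l : List Int) (a x : Int), x ≤ a → x ≤ l.foldl max a := by
    intro l
    induction l with
    | nil => intro a x h; simpa using h
    | cons b t ih => intro a x h; exact ih (max a b) x (le_trans h (le_max_left _ _))
  induction l generalizing a with
  | nil =>
    rcases h with h | h
    · simp [h]
    · simp at h
  | cons b t ih =>
    rcases h with h | h
    · exact seed t (max a b) x (by rw [h]; exact le_max_left a b)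
    · rcases List.mem_cons.1 h with h | h
      · exact seed t (max a b) x (by rw [h]; exact le_max_right a b)
      · exact ih (max a b) (Or.inr h)

theorem pvTop_ge {hm : List (List Int)} {n : Nat} (hm0 : 0 < hm.length)
    (hrow : ∀ row ∈ hm, n ≤ row.length) {i j : Nat} (hi : i < hm.length) (hj : j < n) :
    pvCell hm i j ≤ pvTop hm := by
  have hrowmem : hm.getD i [] ∈ hm := by
    rw [List.getD_eq_getElem _ _ hi]; exact List.getElem_mem hi
  have hjr : j < (hm.getD i []).length := lt_of_lt_of_le hj (hrow _ hrowmem)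
  have h1 : pvCell hm i j ≤ pvRowMax (hm.getD i []) := by
    apply pvLe_foldl_max
    right
    rw [pvCell, List.getD_eq_getElem _ _ hjr]
    exact List.getElem_mem hjr
  have h2 : pvRowMax (hm.getD i []) ≤ pvTop hm := by
    apply pvLe_foldl_max
    right
    have : pvRowMax (hm.getD i []) = (hm.map pvRowMax).getD i 0 := by
      rw [List.getD_eq_getElem _ _ hi, List.getD_eq_getElem _ _ (by simpa using hi),
        List.getElem_map]
    rw [this, List.getD_eq_getElem _ _ (by simpa using hi)]
    exact List.getElem_mem (by simpa using hi)
  exact le_trans h1 h2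

-- geometry of the four directions
theorem pvAdj_of_target {m n x y a b i : Nat} (hi : i < 4) (hx : x < m) (hy : y < n)
    (ham : a < m) (hbn : b < n)
    (ha : (a : Int) = (x : Int) + pvDirs.getD i 0)
    (hb : (b : Int) = (y : Int) + pvDirs.getD (i + 1) 0) : pvAdj m n x y a b := by
  refine ⟨hx, hy, ham, hbn, ?_⟩
  interval_cases i <;> simp [pvDirs] at ha hb <;> omega

theorem pvTarget_of_adj {m n x y a b : Nat} (h : pvAdj m n x y a b) :
    ∃ i, i < 4 ∧ (a : Int) = (x : Int) + pvDirs.getD i 0 ∧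
      (b : Int) = (y : Int) + pvDirs.getD (i + 1) 0 := by
  obtain ⟨hx, hy, ha, hb, hd⟩ := h
  rcases hd with ⟨h1, h2⟩ | ⟨h1, h2⟩ | ⟨h1, h2⟩ | ⟨h1, h2⟩
  · exact ⟨0, by omega, by simp [pvDirs]; omega, by simp [pvDirs]; omega⟩
  · exact ⟨2, by omega, by simp [pvDirs]; omega, by simp [pvDirs]; omega⟩
  · exact ⟨3, by omega, by simp [pvDirs]; omega, by simp [pvDirs]; omega⟩
  · exact ⟨1, by omega, by simp [pvDirs]; omega, by simp [pvDirs]; omega⟩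

-- characterisation of one relaxation step
theorem pvRelax_char (hm : List (List Int)) (m n x y : Nat)
    (st : List (List Int) × List (Nat × Nat)) (i : Nat) :
    pvRelax hm m n x y st i = st ∨
    ∃ a b : Nat, (a : Int) = (x : Int) + pvDirs.getD i 0 ∧
      (b : Int) = (y : Int) + pvDirs.getD (i + 1) 0 ∧ a < m ∧ b < n ∧
      pvCell st.1 x y < pvCell st.1 a b ∧ pvCell hm a b < pvCell st.1 a b ∧
      pvRelax hm m n x y st i =
        (pvSet st.1 a b (max (pvCell st.1 x y) (pvCell hm a b)), st.2 ++ [(a, b)]) := by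
  unfold pvRelax
  simp only []
  split_ifs with h1 h2
  · exact Or.inl rfl
  · push_neg at h1
    obtain ⟨hn1, hn2, hn3, hn4⟩ := h1
    refine Or.inr ⟨((x : Int) + pvDirs.getD i 0).toNat, ((y : Int) + pvDirs.getD (i + 1) 0).toNat,
      ?_, ?_, ?_, ?_, h2.1, h2.2, rfl⟩ <;> omega
  · exact Or.inl rfl

-- bundled facts about one relaxation step
theorem pvRelax_bundle {hm : List (List Int)} {m n x y : Nat}
    {st : List (List Int) × List (Nat × Nat)} {i : Nat}
    (hs : pvShape m n st.1) (hab : pvAbove hm m n st.1) (hq : pvQIn m n st.2)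
    (hx : x < m) (hy : y < n) (hi : i < 4) :
    pvShape m n (pvRelax hm m n x y st i).1 ∧
    pvAbove hm m n (pvRelax hm m n x y st i).1 ∧
    pvQIn m n (pvRelax hm m n x y st i).2 ∧
    pvLe m n (pvRelax hm m n x y st i).1 st.1 ∧
    (∀ p, pvQuies hm m n p → pvLe m n p st.1 → pvLe m n p (pvRelax hm m n x y st i).1) ∧
    (∀ c ∈ st.2, c ∈ (pvRelax hm m n x y st i).2) ∧
    5 * (pvPhi hm m n (pvRelax hm m n x y st i).1).toNat + (pvRelax hm m n x y st i).2.length ≤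
      5 * (pvPhi hm m n st.1).toNat + st.2.length := by
  rcases pvRelax_char hm m n x y st i with h | ⟨a, b, ha, hb, ham, hbn, h5, h6, heq⟩
  · rw [h]
    exact ⟨hs, hab, hq, fun i j _ _ => le_refl _, fun p _ hp => hp, fun c hc => hc, le_refl _⟩
  · rw [heq]
    have hshape' : pvShape m n (pvSet st.1 a b (max (pvCell st.1 x y) (pvCell hm a b))) :=
      pvShape_set (j := b) hs ham _
    have habove' : pvAbove hm m n (pvSet st.1 a b (max (pvCell st.1 x y) (pvCell hm a b))) := by
      intro i' j' hi' hj'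
      by_cases hc : a = i' ∧ b = j'
      · obtain ⟨rfl, rfl⟩ := hc
        rw [pvCell_set_self hs ham hbn]
        exact le_max_right _ _
      · have hne : a ≠ i' ∨ b ≠ j' := by tauto
        rw [pvCell_set_ne hne]
        exact hab i' j' hi' hj'
    refine ⟨hshape', habove', ?_, ?_, ?_, ?_, ?_⟩
    · intro c hc
      rcases List.mem_append.1 hc with hc | hc
      · exact hq c hc
      · simp at hc; subst hc; exact ⟨ham, hbn⟩
    · intro i' j' hi' hj'
      by_cases hc : a = i' ∧ b = j'
      · obtain ⟨rfl, rfl⟩ := hc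
        rw [pvCell_set_self hs ham hbn]
        exact le_of_lt (max_lt h5 h6)
      · have hne : a ≠ i' ∨ b ≠ j' := by tauto
        rw [pvCell_set_ne hne]
    · intro p hp hle i' j' hi' hj'
      by_cases hc : a = i' ∧ b = j'
      · obtain ⟨rfl, rfl⟩ := hc
        rw [pvCell_set_self hs ham hbn]
        have hadj := pvAdj_of_target hi hx hy ham hbn ha hb
        exact le_trans (hp x y a b hadj) (max_le_max (hle x y hx hy) (le_refl _))
      · have hne : a ≠ i' ∨ b ≠ j' := by tauto
        rw [pvCell_set_ne hne]
        exact hle i' j' hi' hj'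
    · exact fun c hc => List.mem_append_left _ hc
    · have hphi := pvPhi_set (hm := hm) hs ham hbn (max (pvCell st.1 x y) (pvCell hm a b))
      have hlt : max (pvCell st.1 x y) (pvCell hm a b) < pvCell st.1 a b := max_lt h5 h6
      have hnn : 0 ≤ pvPhi hm m n (pvSet st.1 a b (max (pvCell st.1 x y) (pvCell hm a b))) :=
        pvPhi_nonneg habove'
      simp only [List.length_append, List.length_cons, List.length_nil]
      omega

-- violated-edge tracking through one relaxation step
theorem pvRelax_viol {hm : List (List Int)} {m n x y : Nat}
    {st : List (List Int) × List (Nat × Nat)} {i : Nat} (hs : pvShape m n st.1)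
    {s1 s2 t1 t2 : Nat} (hv : pvViol hm (pvRelax hm m n x y st i).1 s1 s2 t1 t2) :
    pvViol hm st.1 s1 s2 t1 t2 ∨ (s1, s2) ∈ (pvRelax hm m n x y st i).2 := by
  rcases pvRelax_char hm m n x y st i with h | ⟨a, b, ha, hb, ham, hbn, h5, h6, heq⟩
  · rw [h] at hv
    exact Or.inl hv
  · rw [heq] at hv ⊢
    by_cases hsa : s1 = a ∧ s2 = b
    · obtain ⟨rfl, rfl⟩ := hsa
      right
      simp
    · have hsne : a ≠ s1 ∨ b ≠ s2 := by tauto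
      have hcs := pvCell_set_ne (w := st.1) hsne (max (pvCell st.1 x y) (pvCell hm a b))
      by_cases hta : t1 = a ∧ t2 = b
      · obtain ⟨rfl, rfl⟩ := hta
        left
        obtain ⟨hv1, hv2⟩ := hv
        rw [pvCell_set_self hs ham hbn] at hv1 hv2
        rw [hcs] at hv1
        have hlt : max (pvCell st.1 x y) (pvCell hm t1 t2) < pvCell st.1 t1 t2 := max_lt h5 h6
        exact ⟨lt_trans hv1 hlt, lt_trans hv2 hlt⟩
      · have htne : a ≠ t1 ∨ b ≠ t2 := by tauto
        obtain ⟨hv1, hv2⟩ := hv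
        rw [pvCell_set_ne htne] at hv1 hv2
        rw [hcs] at hv1
        exact Or.inl ⟨hv1, hv2⟩

-- after step i, the edge from (x,y) along direction i is not violated
theorem pvRelax_handled {hm : List (List Int)} {m n x y : Nat}
    {st : List (List Int) × List (Nat × Nat)} {i : Nat} (hs : pvShape m n st.1)
    {t1 t2 : Nat} (ht1 : t1 < m) (ht2 : t2 < n)
    (h1 : (t1 : Int) = (x : Int) + pvDirs.getD i 0)
    (h2 : (t2 : Int) = (y : Int) + pvDirs.getD (i + 1) 0) :
    ¬ pvViol hm (pvRelax hm m n x y st i).1 x y t1 t2 := by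
  by_cases hxy : x = t1 ∧ y = t2
  · obtain ⟨rfl, rfl⟩ := hxy
    intro hv
    exact absurd hv.1 (lt_irrefl _)
  · unfold pvRelax
    simp only []
    split_ifs with hg hc
    · exfalso; omega
    · have hat : ((x : Int) + pvDirs.getD i 0).toNat = t1 := by omega
      have hbt : ((y : Int) + pvDirs.getD (i + 1) 0).toNat = t2 := by omega
      rw [hat, hbt]
      intro hv
      obtain ⟨hv1, hv2⟩ := hv
      have hne : t1 ≠ x ∨ t2 ≠ y := by tauto
      rw [pvCell_set_self hs ht1 ht2] at hv1 hv2
      have hcs : pvCell (pvSet st.1 t1 t2 (max (pvCell st.1 x y) (pvCell hm t1 t2))) x y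
          = pvCell st.1 x y := pvCell_set_ne (by tauto) _
      rw [hcs] at hv1
      rcases max_choice (pvCell st.1 x y) (pvCell hm t1 t2) with h | h <;> omega
    · have hat : ((x : Int) + pvDirs.getD i 0).toNat = t1 := by omega
      have hbt : ((y : Int) + pvDirs.getD (i + 1) 0).toNat = t2 := by omega
      rw [hat, hbt] at hc
      intro hv
      exact hc ⟨hv.1, hv.2⟩

-- a step along direction j ≠ i does not change the cells (x,y) and the direction-i target
theorem pvRelax_frame {hm : List (List Int)} {m n x y : Nat}
    {st : List (List Int) × List (Nat × Nat)} {i j : Nat} (hi : i < 4) (hj : j < 4)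
    (hij : i ≠ j) {t1 t2 : Nat}
    (h1 : (t1 : Int) = (x : Int) + pvDirs.getD i 0)
    (h2 : (t2 : Int) = (y : Int) + pvDirs.getD (i + 1) 0)
    (hnv : ¬ pvViol hm st.1 x y t1 t2) :
    ¬ pvViol hm (pvRelax hm m n x y st j).1 x y t1 t2 := by
  rcases pvRelax_char hm m n x y st j with h | ⟨a, b, ha, hb, ham, hbn, h5, h6, heq⟩
  · rw [h]; exact hnv
  · rw [heq]
    have hne1 : a ≠ x ∨ b ≠ y := by
      interval_cases j <;> simp [pvDirs] at ha hb <;> omega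
    have hne2 : a ≠ t1 ∨ b ≠ t2 := by
      interval_cases i <;> interval_cases j <;> simp [pvDirs] at h1 h2 ha hb <;> omega
    intro hv
    obtain ⟨hv1, hv2⟩ := hv
    rw [pvCell_set_ne hne1] at hv1
    rw [pvCell_set_ne hne2] at hv1 hv2
    exact hnv ⟨hv1, hv2⟩

theorem pvLe_trans {m n : Nat} {u v w : List (List Int)} (h1 : pvLe m n u v)
    (h2 : pvLe m n v w) : pvLe m n u w :=
  fun i j hi hj => le_trans (h1 i j hi hj) (h2 i j hi hj)

-- the whole body of one while-iteration of A
theorem pvIterA {hm : List (List Int)} {m n x y : Nat} {w : List (List Int)}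
    {rest : List (Nat × Nat)} (hx : x < m) (hy : y < n)
    (hs : pvShape m n w) (hab : pvAbove hm m n w)
    (hq : pvQIn m n ((x, y) :: rest)) (hV : pvVInv hm m n w ((x, y) :: rest)) :
    pvShape m n ((List.range 4).foldl (pvRelax hm m n x y) (w, rest)).1 ∧
    pvAbove hm m n ((List.range 4).foldl (pvRelax hm m n x y) (w, rest)).1 ∧
    pvQIn m n ((List.range 4).foldl (pvRelax hm m n x y) (w, rest)).2 ∧
    pvVInv hm m n ((List.range 4).foldl (pvRelax hm m n x y) (w, rest)).1
      ((List.range 4).foldl (pvRelax hm m n x y) (w, rest)).2 ∧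
    pvLe m n ((List.range 4).foldl (pvRelax hm m n x y) (w, rest)).1 w ∧
    (∀ p, pvQuies hm m n p → pvLe m n p w →
      pvLe m n p ((List.range 4).foldl (pvRelax hm m n x y) (w, rest)).1) ∧
    5 * (pvPhi hm m n ((List.range 4).foldl (pvRelax hm m n x y) (w, rest)).1).toNat +
        ((List.range 4).foldl (pvRelax hm m n x y) (w, rest)).2.length ≤
      5 * (pvPhi hm m n w).toNat + rest.length := by
  have hfold : (List.range 4).foldl (pvRelax hm m n x y) (w, rest) =
      pvRelax hm m n x y (pvRelax hm m n x y (pvRelax hm m n x y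
        (pvRelax hm m n x y (w, rest) 0) 1) 2) 3 := rfl
  have hq0 : pvQIn m n rest := fun c hc => hq c (List.mem_cons_of_mem _ hc)
  have b1 := pvRelax_bundle (st := (w, rest)) (i := 0) hs hab hq0 hx hy (by omega)
  obtain ⟨sh1, ab1, qi1, le1, do1, qm1, me1⟩ := b1
  have b2 := pvRelax_bundle (st := pvRelax hm m n x y (w, rest) 0) (i := 1)
    sh1 ab1 qi1 hx hy (by omega)
  obtain ⟨sh2, ab2, qi2, le2, do2, qm2, me2⟩ := b2
  have b3 := pvRelax_bundle (i := 2) sh2 ab2 qi2 hx hy (by omega)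
  obtain ⟨sh3, ab3, qi3, le3, do3, qm3, me3⟩ := b3
  have b4 := pvRelax_bundle (i := 3) sh3 ab3 qi3 hx hy (by omega)
  obtain ⟨sh4, ab4, qi4, le4, do4, qm4, me4⟩ := b4
  rw [hfold]
  refine ⟨sh4, ab4, qi4, ?_, ?_, ?_, ?_⟩
  · -- VInv
    intro s1' s2' t1' t2' hadj hviol
    have ht1 : t1' < m := hadj.2.2.1
    have ht2 : t2' < n := hadj.2.2.2.1
    rcases pvRelax_viol sh3 hviol with h3 | hmem
    swap
    · exact hmem
    rcases pvRelax_viol sh2 h3 with h2 | hmem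
    swap
    · exact qm4 _ hmem
    rcases pvRelax_viol sh1 h2 with h1 | hmem
    swap
    · exact qm4 _ (qm3 _ hmem)
    rcases pvRelax_viol hs h1 with h0 | hmem
    swap
    · exact qm4 _ (qm3 _ (qm2 _ hmem))
    have hsrc := hV s1' s2' t1' t2' hadj h0
    rcases List.mem_cons.1 hsrc with hhd | htl
    swap
    · exact qm4 _ (qm3 _ (qm2 _ (qm1 _ htl)))
    injection hhd with e1 e2
    subst e1; subst e2
    obtain ⟨i, hi4, hco1, hco2⟩ := pvTarget_of_adj hadj
    exfalso
    interval_cases i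
    · have n1 := pvRelax_handled (hm := hm) (st := (w, rest)) (i := 0) hs ht1 ht2 hco1 hco2
      have n2 := pvRelax_frame (m := m) (n := n) (i := 0) (j := 1) (by omega) (by omega) (by omega) hco1 hco2 n1
      have n3 := pvRelax_frame (m := m) (n := n) (i := 0) (j := 2) (by omega) (by omega) (by omega) hco1 hco2 n2
      have n4 := pvRelax_frame (m := m) (n := n) (i := 0) (j := 3) (by omega) (by omega) (by omega) hco1 hco2 n3
      exact n4 hviol
    · have n1 := pvRelax_handled (hm := hm) (i := 1) sh1 ht1 ht2 hco1 hco2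
      have n2 := pvRelax_frame (m := m) (n := n) (i := 1) (j := 2) (by omega) (by omega) (by omega) hco1 hco2 n1
      have n3 := pvRelax_frame (m := m) (n := n) (i := 1) (j := 3) (by omega) (by omega) (by omega) hco1 hco2 n2
      exact n3 hviol
    · have n1 := pvRelax_handled (hm := hm) (i := 2) sh2 ht1 ht2 hco1 hco2
      have n2 := pvRelax_frame (m := m) (n := n) (i := 2) (j := 3) (by omega) (by omega) (by omega) hco1 hco2 n1
      exact n2 hviol
    · have n1 := pvRelax_handled (hm := hm) (i := 3) sh3 ht1 ht2 hco1 hco2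
      exact n1 hviol
  · exact pvLe_trans le4 (pvLe_trans le3 (pvLe_trans le2 le1))
  · intro p hp hle
    exact do4 p hp (do3 p hp (do2 p hp (do1 p hp hle)))
  · exact le_trans me4 (le_trans me3 (le_trans me2 me1))

theorem pvQuies_of_empty {hm : List (List Int)} {m n : Nat} {w : List (List Int)}
    (h : pvVInv hm m n w []) : pvQuies hm m n w := by
  intro x y x' y' hadj
  by_cases hv : pvViol hm w x y x' y'
  · simpa using h x y x' y' hadj hv
  · rcases not_and_or.1 hv with h1 | h1
    · exact le_max_iff.2 (Or.inl (not_lt.1 h1))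
    · exact le_max_iff.2 (Or.inr (not_lt.1 h1))

-- master lemma for A's while loop
theorem pvLoopA_master (hm : List (List Int)) (m n : Nat) :
    ∀ (fuel : Nat) (st : List (List Int) × List (Nat × Nat)),
      pvShape m n st.1 → pvAbove hm m n st.1 → pvQIn m n st.2 → pvVInv hm m n st.1 st.2 →
      pvShape m n (pvLoopA hm m n fuel st) ∧
      pvLe m n (pvLoopA hm m n fuel st) st.1 ∧
      (∀ p, pvQuies hm m n p → pvLe m n p st.1 → pvLe m n p (pvLoopA hm m n fuel st)) ∧
      (5 * (pvPhi hm m n st.1).toNat + st.2.length < fuel →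
        pvQuies hm m n (pvLoopA hm m n fuel st)) := by
  intro fuel
  induction fuel with
  | zero =>
    intro st hs hab hq hV
    refine ⟨hs, fun i j _ _ => le_refl _, fun p _ hp => hp, fun h => absurd h (by omega)⟩
  | succ fuel ih =>
    intro st hs hab hq hV
    obtain ⟨w, qu⟩ := st
    rcases qu with _ | ⟨⟨x, y⟩, rest⟩
    · simp only [pvLoopA]
      exact ⟨hs, fun i j _ _ => le_refl _, fun p _ hp => hp, fun _ => pvQuies_of_empty hV⟩
    · have hx : x < m := (hq (x, y) List.mem_cons_self).1
      have hy : y < n := (hq (x, y) List.mem_cons_self).2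
      have hiter := pvIterA (hm := hm) (m := m) (n := n) (x := x) (y := y) (w := w)
        (rest := rest) hx hy hs hab hq hV
      obtain ⟨sh', ab', qi', vi', le', do', me'⟩ := hiter
      have hrec := ih ((List.range 4).foldl (pvRelax hm m n x y) (w, rest)) sh' ab' qi' vi'
      simp only [pvLoopA]
      refine ⟨hrec.1, pvLe_trans hrec.2.1 le', fun p hp hle => hrec.2.2.1 p hp (do' p hp hle), ?_⟩
    
      intro hfuel
      have hfuel' : 5 * (pvPhi hm m n w).toNat + (rest.length + 1) < fuel + 1 := by
        simpa using hfuel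
      have hm2 : 5 * (pvPhi hm m n ((List.range 4).foldl (pvRelax hm m n x y) (w, rest)).1).toNat +
          ((List.range 4).foldl (pvRelax hm m n x y) (w, rest)).2.length < fuel := by omega
      exact hrec.2.2.2 hm2

theorem pvInitStep_char (hm : List (List Int)) (m n : Nat)
    (st : List (List Int) × List (Nat × Nat)) (c : Nat × Nat) :
    (pvInitStep hm m n st c = st) ∨
    (pvBdry m n c.1 c.2 ∧ pvCell hm c.1 c.2 < pvCell st.1 c.1 c.2 ∧
      pvInitStep hm m n st c = (pvSet st.1 c.1 c.2 (pvCell hm c.1 c.2), st.2 ++ [c])) := by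
  unfold pvInitStep
  split_ifs with h1 h2
  · exact Or.inr ⟨h1, h2, rfl⟩
  · exact Or.inl rfl
  · exact Or.inl rfl

theorem pvMem_allCells {m n i j : Nat} : (i, j) ∈ pvAllCells m n ↔ i < m ∧ j < n := by
  simp [pvAllCells, List.mem_flatMap, List.mem_range, eq_comm, and_comm]

theorem pvMem_allCells' {m n : Nat} {c : Nat × Nat} (h : c ∈ pvAllCells m n) :
    c.1 < m ∧ c.2 < n := by
  obtain ⟨i, j⟩ := c
  exact pvMem_allCells.1 h

theorem pvInitA_eq (hm : List (List Int)) (m n : Nat) (top : Int) :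
    pvInitA hm m n top =
      (pvAllCells m n).foldl (pvInitStep hm m n) (List.replicate m (List.replicate n top), []) := by
  unfold pvInitA pvAllCells
  rw [pvFoldl_flatMap]
  simp only [List.foldl_map]

theorem pvCell_replicate {m n : Nat} {top : Int} {i j : Nat} (hi : i < m) (hj : j < n) :
    pvCell (List.replicate m (List.replicate n top)) i j = top := by
  simp [pvCell, List.getD, List.getElem?_replicate, hi, hj]

-- initialisation of A: exact value of every cell, and lowered cells are queued
theorem pvInitA_master {hm : List (List Int)} {m n : Nat} {top : Int}
    (htop : ∀ i j, i < m → j < n → pvCell hm i j ≤ top) :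
    pvShape m n (pvInitA hm m n top).1 ∧
    pvQIn m n (pvInitA hm m n top).2 ∧
    (∀ i j, i < m → j < n →
      pvCell (pvInitA hm m n top).1 i j = pvE hm m n top i j ∧
      (pvE hm m n top i j ≠ top → (i, j) ∈ (pvInitA hm m n top).2)) := by
  rw [pvInitA_eq]
  have hmain := pvFoldl_establish
    (G := fun st : List (List Int) × List (Nat × Nat) =>
      pvShape m n st.1 ∧ pvQIn m n st.2 ∧ ∀ c : Nat × Nat, c.1 < m → c.2 < n →
        (pvCell st.1 c.1 c.2 = top ∨ pvCell st.1 c.1 c.2 = pvE hm m n top c.1 c.2) ∧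
        (pvCell st.1 c.1 c.2 ≠ top → c ∈ st.2))
    (P := fun (c : Nat × Nat) (st : List (List Int) × List (Nat × Nat)) =>
      pvCell st.1 c.1 c.2 = pvE hm m n top c.1 c.2 ∧
        (pvE hm m n top c.1 c.2 ≠ top → c ∈ st.2))
    (f := pvInitStep hm m n) (l := pvAllCells m n)
    ?_ ?_ ?_ (List.replicate m (List.replicate n top), []) ?_
  · obtain ⟨⟨hsh, hqi, _⟩, hP⟩ := hmain
    refine ⟨hsh, hqi, ?_⟩
    intro i j hi hj
    exact hP (i, j) (pvMem_allCells.2 ⟨hi, hj⟩)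
  · -- G is invariant
    rintro ⟨w, qu⟩ c hc ⟨hsh, hqi, hcells⟩
    obtain ⟨hc1, hc2⟩ := pvMem_allCells' hc
    rcases pvInitStep_char hm m n (w, qu) c with h | ⟨hbd, hlt, h⟩
    · rw [h]; exact ⟨hsh, hqi, hcells⟩
    · rw [h]
      refine ⟨pvShape_set (j := c.2) hsh hc1 _, ?_, ?_⟩
      · intro c' hc'
        rcases List.mem_append.1 hc' with hc' | hc'
        · exact hqi c' hc'
        · simp at hc'; subst hc'; exact ⟨hc1, hc2⟩
      · intro c' h1' h2'
        by_cases hceq : c.1 = c'.1 ∧ c.2 = c'.2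
        · have hcc : c = c' := Prod.ext hceq.1 hceq.2
          subst hcc
          rw [pvCell_set_self hsh hc1 hc2]
          constructor
          · by_cases hE : pvBdry m n c.1 c.2 ∧ pvCell hm c.1 c.2 < top
            · right; rw [pvE, if_pos hE]
            · exfalso
              rcases (hcells c hc1 hc2).1 with hold | hold
              · exact hE ⟨hbd, by rw [hold] at hlt; exact hlt⟩
              · rw [pvE] at hold
                rw [if_neg hE] at hold
                exact hE ⟨hbd, by rw [hold] at hlt; exact hlt⟩
          · intro _
            exact List.mem_append_right _ (by simp)
        · have hne : c.1 ≠ c'.1 ∨ c.2 ≠ c'.2 := by tauto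
          rw [pvCell_set_ne hne]
          refine ⟨(hcells c' h1' h2').1, fun hne' => List.mem_append_left _ ((hcells c' h1' h2').2 hne')⟩
  · -- establishment
    rintro ⟨w, qu⟩ c hc ⟨hsh, hqi, hcells⟩
    obtain ⟨hc1, hc2⟩ := pvMem_allCells' hc
    rcases pvInitStep_char hm m n (w, qu) c with h | ⟨hbd, hlt, h⟩
    · rw [h]
      rcases (hcells c hc1 hc2).1 with hold | hold
      · -- current value is top and the step did nothing
        have hno : ¬ (pvBdry m n c.1 c.2 ∧ pvCell hm c.1 c.2 < top) := by
          intro hE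
          have : pvInitStep hm m n (w, qu) c =
              (pvSet w c.1 c.2 (pvCell hm c.1 c.2), qu ++ [c]) := by
            unfold pvInitStep
            rw [if_pos hE.1, if_pos (by rw [hold]; exact hE.2)]
          rw [h] at this
          have : w = pvSet w c.1 c.2 (pvCell hm c.1 c.2) := congrArg Prod.fst this
          have hcc := pvCell_set_self hsh hc1 hc2 (pvCell hm c.1 c.2)
          rw [← this, hold] at hcc
          omega
        refine ⟨by rw [hold, pvE, if_neg hno], fun hEt => ?_⟩
        · exfalso; rw [pvE, if_neg hno] at hEt; exact hEt rfl
      · exact ⟨hold, fun hEt => (hcells c hc1 hc2).2 (by rw [hold]; exact hEt)⟩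
    · rw [h]
      rw [pvCell_set_self hsh hc1 hc2]
      by_cases hE : pvBdry m n c.1 c.2 ∧ pvCell hm c.1 c.2 < top
      · exact ⟨by rw [pvE, if_pos hE], fun _ => List.mem_append_right _ (by simp)⟩
      · exfalso
        rcases (hcells c hc1 hc2).1 with hold | hold
        · exact hE ⟨hbd, by rw [hold] at hlt; exact hlt⟩
        · rw [pvE, if_neg hE] at hold
          exact hE ⟨hbd, by rw [hold] at hlt; exact hlt⟩
  · -- stability
    rintro ⟨w, qu⟩ c c' hc hc' ⟨hsh, hqi, hcells⟩ hP
    obtain ⟨hc1, hc2⟩ := pvMem_allCells' hc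
    obtain ⟨hc1', hc2'⟩ := pvMem_allCells' hc'
    rcases pvInitStep_char hm m n (w, qu) c' with h | ⟨hbd, hlt, h⟩
    · rw [h]; exact hP
    · rw [h]
      by_cases hceq : c'.1 = c.1 ∧ c'.2 = c.2
      · exfalso
        have hcc : c' = c := Prod.ext hceq.1 hceq.2
        subst hcc
        rw [hP.1] at hlt
        by_cases hE : pvBdry m n c'.1 c'.2 ∧ pvCell hm c'.1 c'.2 < top
        · rw [pvE, if_pos hE] at hlt; omega
        · rw [pvE, if_neg hE] at hlt; exact hE ⟨hbd, hlt⟩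
      · have hne : c'.1 ≠ c.1 ∨ c'.2 ≠ c.2 := by tauto
        rw [pvCell_set_ne hne]
        exact ⟨hP.1, fun hEt => List.mem_append_left _ (hP.2 hEt)⟩
  · -- initial state satisfies G
    refine ⟨⟨by simp, fun row hr => ?_⟩, fun c hc => by simp at hc, fun c hc1 hc2 => ?_⟩
    · rw [List.eq_of_mem_replicate hr]; simp
    · rw [pvCell_replicate hc1 hc2]
      exact ⟨Or.inl rfl, fun h => absurd rfl h⟩

-- B's start grid
theorem pvInitB_cell {hm : List (List Int)} {m n : Nat} {top : Int} {i j : Nat}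
    (hi : i < m) (hj : j < n) :
    pvCell ((List.range m).map (fun i => (List.range n).map (fun j =>
      if i = 0 ∨ i = m - 1 ∨ j = 0 ∨ j = n - 1 then pvCell hm i j else top))) i j =
      if pvBdry m n i j then pvCell hm i j else top := by
  simp [pvCell, List.getD, List.getElem?_map, List.getElem?_range, hi, hj, pvBdry]

theorem pvInitB_shape (hm : List (List Int)) (m n : Nat) (top : Int) :
    pvShape m n ((List.range m).map (fun i => (List.range n).map (fun j =>
      if i = 0 ∨ i = m - 1 ∨ j = 0 ∨ j = n - 1 then pvCell hm i j else top))) := by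
  constructor
  · simp
  · intro row hr
    simp at hr
    obtain ⟨i, _, hrow⟩ := hr
    rw [← hrow]; simp

theorem pvMin4_mono {m n : Nat} {p w : List (List Int)} {i j : Nat}
    (hle : pvLe m n p w) (hint : 1 ≤ i ∧ i + 1 < m ∧ 1 ≤ j ∧ j + 1 < n) :
    pvMin4 p i j ≤ pvMin4 w i j := by
  obtain ⟨h1, h2, h3, h4⟩ := hint
  unfold pvMin4
  exact min_le_min (min_le_min (min_le_min
    (hle _ _ (by omega) (by omega)) (hle _ _ (by omega) (by omega)))
    (hle _ _ (by omega) (by omega))) (hle _ _ (by omega) (by omega))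

theorem pvQuies_local {hm : List (List Int)} {m n : Nat} {p : List (List Int)} {i j : Nat}
    (hp : pvQuies hm m n p) (hint : 1 ≤ i ∧ i + 1 < m ∧ 1 ≤ j ∧ j + 1 < n) :
    pvCell p i j ≤ max (pvCell hm i j) (pvMin4 p i j) := by
  obtain ⟨h1, h2, h3, h4⟩ := hint
  have ha := hp (i - 1) j i j ⟨by omega, by omega, by omega, by omega, Or.inr (Or.inl ⟨by omega, rfl⟩)⟩
  have hb := hp (i + 1) j i j ⟨by omega, by omega, by omega, by omega, Or.inl ⟨by omega, rfl⟩⟩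
  have hc := hp i (j - 1) i j ⟨by omega, by omega, by omega, by omega,
    Or.inr (Or.inr (Or.inr ⟨rfl, by omega⟩))⟩
  have hd := hp i (j + 1) i j ⟨by omega, by omega, by omega, by omega,
    Or.inr (Or.inr (Or.inl ⟨rfl, by omega⟩))⟩
  by_cases hcase : pvCell p i j ≤ pvCell hm i j
  · exact le_max_iff.2 (Or.inl hcase)
  · push_neg at hcase
    have e1 : pvCell p i j ≤ pvCell p (i - 1) j := by
      rcases le_max_iff.1 ha with h | h
      · exact h
      · omega
    have e2 : pvCell p i j ≤ pvCell p (i + 1) j := by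
      rcases le_max_iff.1 hb with h | h
      · exact h
      · omega
    have e3 : pvCell p i j ≤ pvCell p i (j - 1) := by
      rcases le_max_iff.1 hc with h | h
      · exact h
      · omega
    have e4 : pvCell p i j ≤ pvCell p i (j + 1) := by
      rcases le_max_iff.1 hd with h | h
      · exact h
      · omega
    refine le_max_iff.2 (Or.inr ?_)
    unfold pvMin4
    exact le_min (le_min (le_min e1 e2) e3) e4

-- bundled facts about one cell step of B
theorem pvCellStep_bundle {hm : List (List Int)} {m n : Nat} {st : List (List Int) × Bool}
    {i j : Nat} (hs : pvShape m n st.1) (hint : 1 ≤ i ∧ i + 1 < m ∧ 1 ≤ j ∧ j + 1 < n) :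
    pvShape m n (pvCellStep hm st i j).1 ∧
    (pvAbove hm m n st.1 → pvAbove hm m n (pvCellStep hm st i j).1) ∧
    pvLe m n (pvCellStep hm st i j).1 st.1 ∧
    (∀ p, pvQuies hm m n p → pvLe m n p st.1 → pvLe m n p (pvCellStep hm st i j).1) ∧
    (pvBInv hm m n st.1 → pvBInv hm m n (pvCellStep hm st i j).1) := by
  obtain ⟨h1, h2, h3, h4⟩ := hint
  unfold pvCellStep
  simp only []
  split_ifs with hg
  · refine ⟨pvShape_set (j := j) hs (by omega) _, ?_, ?_, ?_, ?_⟩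
    · intro hab i' j' hi' hj'
      by_cases hc : i = i' ∧ j = j'
      · obtain ⟨rfl, rfl⟩ := hc
        rw [pvCell_set_self hs (by omega) (by omega)]
        exact le_max_left _ _
      · rw [pvCell_set_ne (by tauto)]
        exact hab i' j' hi' hj'
    · intro i' j' hi' hj'
      by_cases hc : i = i' ∧ j = j'
      · obtain ⟨rfl, rfl⟩ := hc
        rw [pvCell_set_self hs (by omega) (by omega)]
        exact le_of_lt hg
      · rw [pvCell_set_ne (by tauto)]
    · intro p hp hle i' j' hi' hj'
      by_cases hc : i = i' ∧ j = j'
      · obtain ⟨rfl, rfl⟩ := hc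
        rw [pvCell_set_self hs (by omega) (by omega)]
        refine le_trans (pvQuies_local hp ⟨h1, h2, h3, h4⟩) ?_
        exact max_le_max (le_refl _) (pvMin4_mono hle ⟨h1, h2, h3, h4⟩)
      · rw [pvCell_set_ne (by tauto)]
        exact hle i' j' hi' hj'
    · intro hB i' j' hi' hj' hbdry
      by_cases hc : i = i' ∧ j = j'
      · exfalso
        obtain ⟨rfl, rfl⟩ := hc
        rcases hbdry with h | h | h | h <;> omega
      · rw [pvCell_set_ne (by tauto)]
        exact hB i' j' hi' hj' hbdry
  · exact ⟨hs, fun hab => hab, fun i' j' _ _ => le_refl _, fun p _ hp => hp, fun hB => hB⟩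

-- change bookkeeping of one cell step relative to the sweep's start grid
theorem pvCellStep_phi {hm : List (List Int)} {m n : Nat} {w0 : List (List Int)}
    {st : List (List Int) × Bool} {i j : Nat} (hs : pvShape m n st.1)
    (hint : 1 ≤ i ∧ i + 1 < m ∧ 1 ≤ j ∧ j + 1 < n)
    (h : (st.2 = false → st.1 = w0) ∧ (st.2 = true → pvPhi hm m n st.1 < pvPhi hm m n w0)) :
    ((pvCellStep hm st i j).2 = false → (pvCellStep hm st i j).1 = w0) ∧
    ((pvCellStep hm st i j).2 = true →
      pvPhi hm m n (pvCellStep hm st i j).1 < pvPhi hm m n w0) := by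
  obtain ⟨h1, h2, h3, h4⟩ := hint
  unfold pvCellStep
  simp only []
  split_ifs with hg
  · constructor
    · intro hfalse; simp at hfalse
    · intro _
      have hphi := pvPhi_set (hm := hm) hs (i := i) (j := j) (by omega) (by omega)
        (max (pvCell hm i j) (pvMin4 st.1 i j))
      cases hb : st.2 with
      | false =>
        have hw := h.1 hb
        rw [hw] at hphi hg ⊢
        dsimp only
        omega
      | true =>
        have hlt := h.2 hb
        dsimp only
        rw [hphi]
        omega
  · exact h

theorem pvFold_true {hm : List (List Int)} (L : List (Nat × Nat))
    (st : List (List Int) × Bool) (h : st.2 = true) :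
    (L.foldl (fun st c => pvCellStep hm st c.1 c.2) st).2 = true := by
  refine pvFoldl_inv (fun s => s.2 = true) _ L ?_ st h
  intro b c _ hb
  unfold pvCellStep
  simp only []
  split_ifs with hg
  · rfl
  · exact hb

-- an unchanged sweep means every visited cell is locally quiescent
theorem pvSweepFold_false {hm : List (List Int)} (L : List (Nat × Nat)) (w : List (List Int))
    (h : (L.foldl (fun st c => pvCellStep hm st c.1 c.2) (w, false)).2 = false) :
    (L.foldl (fun st c => pvCellStep hm st c.1 c.2) (w, false)) = (w, false) ∧
    ∀ c ∈ L, pvLQ hm w c.1 c.2 := by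
  induction L generalizing w with
  | nil => exact ⟨rfl, by simp⟩
  | cons c t ih =>
    rw [List.foldl_cons] at h ⊢
    by_cases hg : max (pvCell hm c.1 c.2) (pvMin4 w c.1 c.2) < pvCell w c.1 c.2
    · exfalso
      have hstep : pvCellStep hm (w, false) c.1 c.2 =
          (pvSet w c.1 c.2 (max (pvCell hm c.1 c.2) (pvMin4 w c.1 c.2)), true) := by
        unfold pvCellStep
        simp only []
        rw [if_pos hg]
      rw [hstep] at h
      rw [pvFold_true t _ rfl] at h
      simp at h
    · have hstep : pvCellStep hm (w, false) c.1 c.2 = (w, false) := by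
        unfold pvCellStep
        simp only []
        rw [if_neg hg]
      rw [hstep] at h ⊢
      obtain ⟨hfix, hall⟩ := ih w h
      refine ⟨hfix, ?_⟩
      intro c' hc'
      rcases List.mem_cons.1 hc' with h' | h'
      · subst h'
        exact not_lt.1 hg
      · exact hall c' h'

theorem pvSweep_eq (hm : List (List Int)) (m n : Nat) (fwd : Bool) (w : List (List Int)) :
    pvSweep hm m n fwd w =
      (pvIntCells m n fwd).foldl (fun st c => pvCellStep hm st c.1 c.2) (w, false) := by
  unfold pvSweep pvIntCells
  rw [pvFoldl_flatMap]
  simp only [List.foldl_map]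

theorem pvMem_intCells {m n : Nat} {fwd : Bool} {i j : Nat}
    (h : 1 ≤ i ∧ i + 1 < m ∧ 1 ≤ j ∧ j + 1 < n) : (i, j) ∈ pvIntCells m n fwd := by
  obtain ⟨h1, h2, h3, h4⟩ := h
  have hi : i ∈ (if fwd then List.range' 1 (m - 1 - 1) else (List.range' 1 (m - 1 - 1)).reverse) := by
    cases fwd <;> simp [List.mem_range'_1] <;> omega
  have hj : j ∈ (if fwd then List.range' 1 (n - 1 - 1) else (List.range' 1 (n - 1 - 1)).reverse) := by
    cases fwd <;> simp [List.mem_range'_1] <;> omega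
  exact List.mem_flatMap.2 ⟨i, hi, List.mem_map.2 ⟨j, hj, rfl⟩⟩

theorem pvIntCells_int {m n : Nat} {fwd : Bool} {c : Nat × Nat} (h : c ∈ pvIntCells m n fwd) :
    1 ≤ c.1 ∧ c.1 + 1 < m ∧ 1 ≤ c.2 ∧ c.2 + 1 < n := by
  obtain ⟨i, hi, hmap⟩ := List.mem_flatMap.1 h
  obtain ⟨j, hj, hc⟩ := List.mem_map.1 hmap
  subst hc
  have hi' : 1 ≤ i ∧ i < 1 + (m - 1 - 1) := by
    cases fwd <;> simpa [List.mem_range'_1] using hi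
  have hj' : 1 ≤ j ∧ j < 1 + (n - 1 - 1) := by
    cases fwd <;> simpa [List.mem_range'_1] using hj
  exact ⟨by omega, by omega, by omega, by omega⟩

-- local quiescence everywhere (plus fixed boundary) gives edge quiescence
theorem pvQuies_of_sweep {hm : List (List Int)} {m n : Nat} {w : List (List Int)}
    (hb : pvBInv hm m n w)
    (hl : ∀ i j, 1 ≤ i → i + 1 < m → 1 ≤ j → j + 1 < n → pvLQ hm w i j) :
    pvQuies hm m n w := by
  intro x y x' y' hadj
  obtain ⟨hx, hy, hx', hy', hd⟩ := hadj
  by_cases hint : 1 ≤ x' ∧ x' + 1 < m ∧ 1 ≤ y' ∧ y' + 1 < n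
  · have hlq := hl x' y' hint.1 hint.2.1 hint.2.2.1 hint.2.2.2
    have hminle : pvMin4 w x' y' ≤ pvCell w x y := by
      unfold pvMin4
      rcases hd with ⟨h1, h2⟩ | ⟨h1, h2⟩ | ⟨h1, h2⟩ | ⟨h1, h2⟩
      · have hxx : x' + 1 = x := by omega
        rw [← hxx, ← h2]
        exact le_trans (min_le_left _ _)
          (le_trans (min_le_left _ _) (min_le_right _ _))
      · have hxx : x' - 1 = x := by omega
        rw [hxx, h2]
        exact le_trans (min_le_left _ _)
          (le_trans (min_le_left _ _) (min_le_left _ _))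
      · have hyy : y' + 1 = y := by omega
        rw [← hyy, ← h1]
        exact min_le_right _ _
      · have hyy : y' - 1 = y := by omega
        rw [hyy, h1]
        exact le_trans (min_le_left _ _) (min_le_right _ _)
    unfold pvLQ at hlq
    exact le_trans hlq (max_le (le_max_right _ _) (le_trans hminle (le_max_left _ _)))
  · have hbd : pvBdry m n x' y' := by omega
    rw [hb x' y' hx' hy' hbd]
    exact le_max_right _ _

def pvSweepInv (hm : List (List Int)) (m n : Nat) (w0 : List (List Int))
    (st : List (List Int) × Bool) : Prop :=
  pvShape m n st.1 ∧ pvAbove hm m n st.1 ∧ pvBInv hm m n st.1 ∧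
    pvLe m n st.1 w0 ∧ (∀ p, pvQuies hm m n p → pvLe m n p w0 → pvLe m n p st.1) ∧
    (st.2 = false → st.1 = w0) ∧ (st.2 = true → pvPhi hm m n st.1 < pvPhi hm m n w0)

theorem pvCellStep_inv {hm : List (List Int)} {m n : Nat} {w0 : List (List Int)}
    {st : List (List Int) × Bool} {c : Nat × Nat}
    (hc : 1 ≤ c.1 ∧ c.1 + 1 < m ∧ 1 ≤ c.2 ∧ c.2 + 1 < n)
    (hI : pvSweepInv hm m n w0 st) : pvSweepInv hm m n w0 (pvCellStep hm st c.1 c.2) := by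
  obtain ⟨hsh, hab', hB', hle, hdom, hfix, hphi⟩ := hI
  obtain ⟨bsh, bab, ble, bdom, bB⟩ := pvCellStep_bundle hsh hc
  have bphi := pvCellStep_phi (w0 := w0) hsh hc ⟨hfix, hphi⟩
  exact ⟨bsh, bab hab', bB hB', pvLe_trans ble hle,
    fun p hp hle' => bdom p hp (hdom p hp hle'), bphi.1, bphi.2⟩

theorem pvSweepFold_inv {hm : List (List Int)} {m n : Nat} {w0 : List (List Int)}
    (L : List (Nat × Nat)) (hL : ∀ c ∈ L, 1 ≤ c.1 ∧ c.1 + 1 < m ∧ 1 ≤ c.2 ∧ c.2 + 1 < n)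
    (st : List (List Int) × Bool) (hI : pvSweepInv hm m n w0 st) :
    pvSweepInv hm m n w0 (L.foldl (fun st c => pvCellStep hm st c.1 c.2) st) :=
  pvFoldl_inv (pvSweepInv hm m n w0) _ L (fun b a ha hb => pvCellStep_inv (hL a ha) hb) st hI

-- master lemma for B's while loop
set_option maxHeartbeats 1600000 in
theorem pvLoopB_master (hm : List (List Int)) (m n : Nat) :
    ∀ (fuel : Nat) (fwd : Bool) (w : List (List Int)),
      pvShape m n w → pvAbove hm m n w → pvBInv hm m n w →
      (pvPhi hm m n w).toNat < fuel →
      pvShape m n (pvLoopB hm m n fuel fwd w) ∧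
      pvLe m n (pvLoopB hm m n fuel fwd w) w ∧
      (∀ p, pvQuies hm m n p → pvLe m n p w → pvLe m n p (pvLoopB hm m n fuel fwd w)) ∧
      pvQuies hm m n (pvLoopB hm m n fuel fwd w) := by
  intro fuel
  induction fuel with
  | zero =>
    intro fwd w _ _ _ hf
    exact absurd hf (by omega)
  | succ fuel ih =>
    intro fwd w hs hab hB hf
    have hinv := pvSweepFold_inv (w0 := w) (pvIntCells m n fwd) (fun c hc => pvIntCells_int hc)
      (w, false) (by
        refine ⟨hs, hab, hB, fun i j _ _ => le_refl _, fun p _ hp => hp, fun _ => rfl, ?_⟩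
        intro hco
        simp at hco)
    rw [← pvSweep_eq] at hinv
    obtain ⟨ssh, sab, sB, sle, sdom, sfix, sphi⟩ := hinv
    cases hch : (pvSweep hm m n fwd w).2 with
    | false =>
      have hw := sfix hch
      have hres : pvLoopB hm m n (fuel + 1) fwd w = (pvSweep hm m n fwd w).1 := by
        simp only [pvLoopB, hch]
        simp
      rw [hres, hw]
      have hfold : ((pvIntCells m n fwd).foldl (fun st c => pvCellStep hm st c.1 c.2)
          (w, false)).2 = false := by
        rw [← pvSweep_eq]; exact hch
      obtain ⟨_, hall⟩ := pvSweepFold_false (pvIntCells m n fwd) w hfold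
      refine ⟨hs, fun i j _ _ => le_refl _, fun p _ hp => hp, ?_⟩
      exact pvQuies_of_sweep hB (fun i j h1 h2 h3 h4 =>
        hall (i, j) (pvMem_intCells ⟨h1, h2, h3, h4⟩))
    | true =>
      have hphi' := sphi hch
      have hnn : 0 ≤ pvPhi hm m n (pvSweep hm m n fwd w).1 := pvPhi_nonneg sab
      have hrec := ih (!fwd) (pvSweep hm m n fwd w).1 ssh sab sB (by omega)
      have hres : pvLoopB hm m n (fuel + 1) fwd w =
          pvLoopB hm m n fuel (!fwd) (pvSweep hm m n fwd w).1 := by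
        simp only [pvLoopB, hch]
        simp
      rw [hres]
      exact ⟨hrec.1, pvLe_trans hrec.2.1 sle,
        fun p hp hle' => hrec.2.2.1 p hp (sdom p hp hle'), hrec.2.2.2⟩

-- sums
theorem pvFoldl_range_sum (f : Nat → Int) (a : Int) (k : Nat) :
    (List.range k).foldl (fun acc i => acc + f i) a = a + ∑ i ∈ Finset.range k, f i := by
  induction k generalizing a with
  | zero => simp
  | succ k ih =>
    rw [List.range_succ, List.foldl_append, ih, Finset.sum_range_succ]
    simp [add_assoc]

theorem pvSum_map_range (f : Nat → Int) (k : Nat) :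
    ((List.range k).map f).sum = ∑ i ∈ Finset.range k, f i := by
  induction k with
  | zero => simp
  | succ k ih =>
    rw [List.range_succ, List.map_append, List.sum_append, ih, Finset.sum_range_succ]
    simp

-- ===== VERDICT (by name: the statement is the Claim_ definition above) =====
theorem trapRainWater_spec : Claim_equal_trapRainWater := by
  unfold Claim_equal_trapRainWater
  intro H _ hpre
  unfold Spec_trapRainWater
  obtain ⟨hm0, hn0, hrows⟩ := hpre
  simp only [trapRainWater, trapRainWater_alt]
  set m := H.length with hmdef
  set n := (H.getD 0 []).length with hndef
  set top := pvTop H with htopdef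
  set st0 := pvInitA H m n top with hst0
  set fuelA := 5 * (pvPhi H m n st0.1).toNat + st0.2.length + 1 with hfA
  set Afin := pvLoopA H m n fuelA st0 with hAfin
  set w0 := (List.range m).map (fun i => (List.range n).map (fun j =>
      if i = 0 ∨ i = m - 1 ∨ j = 0 ∨ j = n - 1 then pvCell H i j else top)) with hw0
  set fuelB := (pvPhi H m n w0).toNat + 1 with hfB
  set Bfin := pvLoopB H m n fuelB true w0 with hBfin
  have htop : ∀ i j, i < m → j < n → pvCell H i j ≤ top := fun i j hi hj =>
    pvTop_ge hm0 hrows hi hj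
  -- A initialisation facts
  obtain ⟨ish, iqi, icell⟩ := pvInitA_master (hm := H) (m := m) (n := n) (top := top) htop
  have hEle : ∀ i j, i < m → j < n → pvE H m n top i j ≤ top := by
    intro i j hi hj
    unfold pvE
    split_ifs with h
    · exact le_of_lt h.2
    · exact le_refl _
  have hEabove : ∀ i j, i < m → j < n → pvCell H i j ≤ pvE H m n top i j := by
    intro i j hi hj
    unfold pvE
    split_ifs with h
    · exact le_refl _
    · exact htop i j hi hj
  have iabove : pvAbove H m n st0.1 := by
    intro i j hi hj
    rw [(icell i j hi hj).1]
    exact hEabove i j hi hj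
  have ivinv : pvVInv H m n st0.1 st0.2 := by
    intro x y x' y' hadj hviol
    have hcx := (icell x y hadj.1 hadj.2.1).1
    have hct := (icell x' y' hadj.2.2.1 hadj.2.2.2.1).1
    have h1 : pvCell st0.1 x' y' ≤ top := by
      rw [hct]; exact hEle x' y' hadj.2.2.1 hadj.2.2.2.1
    have h2 : pvE H m n top x y ≠ top := by
      have h3 := hviol.1
      rw [hcx] at h3
      omega
    exact (icell x y hadj.1 hadj.2.1).2 h2
  -- A loop
  obtain ⟨ash, ale, adom, aquies'⟩ :=
    pvLoopA_master H m n fuelA st0 ish iabove iqi ivinv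
  have aquies : pvQuies H m n Afin := aquies' (by omega)
  -- B initialisation facts
  have bsh : pvShape m n w0 := pvInitB_shape H m n top
  have bcell : ∀ i j, i < m → j < n →
      pvCell w0 i j = if pvBdry m n i j then pvCell H i j else top := by
    intro i j hi hj
    rw [hw0]
    exact pvInitB_cell (hm := H) (m := m) (n := n) (top := top) hi hj
  have bB : pvBInv H m n w0 := by
    intro i j hi hj hbd
    rw [bcell i j hi hj, if_pos hbd]
  have babove : pvAbove H m n w0 := by
    intro i j hi hj
    rw [bcell i j hi hj]
    split_ifs with h
    · exact le_refl _
    · exact htop i j hi hj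
  obtain ⟨bsh', ble, bdom, bquies⟩ :=
    pvLoopB_master H m n fuelB true w0 bsh babove bB (by omega)
  -- equal start grids
  have hstart : ∀ i j, i < m → j < n → pvCell st0.1 i j = pvCell w0 i j := by
    intro i j hi hj
    rw [(icell i j hi hj).1, bcell i j hi hj]
    unfold pvE
    by_cases hbd : pvBdry m n i j
    · rw [if_pos hbd]
      by_cases hlt : pvCell H i j < top
      · rw [if_pos ⟨hbd, hlt⟩]
      · rw [if_neg (by tauto)]
        have := htop i j hi hj
        omega
    · rw [if_neg (by tauto), if_neg hbd]
  -- cross domination in both directions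
  have hle1 : pvLe m n Bfin st0.1 := by
    intro i j hi hj
    rw [hstart i j hi hj]
    exact ble i j hi hj
  have hBA : pvLe m n Bfin Afin := adom Bfin bquies hle1
  have hle2 : pvLe m n Afin w0 := by
    intro i j hi hj
    rw [← hstart i j hi hj]
    exact ale i j hi hj
  have hAB : pvLe m n Afin Bfin := bdom Afin aquies hle2
  have hfin : ∀ i j, i < m → j < n → pvCell Afin i j = pvCell Bfin i j := fun i j hi hj =>
    le_antisymm (hAB i j hi hj) (hBA i j hi hj)
  -- both answers are the potential of the final grid
  have hLHS : (List.range m).foldl (fun ans i => (List.range n).foldl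
      (fun ans j => ans + pvCell Afin i j - pvCell H i j) ans) 0 = pvPhi H m n Afin := by
    have hswap : ∀ i : Nat, (fun (ans : Int) (j : Nat) => ans + pvCell Afin i j - pvCell H i j) =
        (fun (ans : Int) (j : Nat) => ans + (pvCell Afin i j - pvCell H i j)) := by
      intro i; funext ans j; ring
    have hinner : (fun (ans : Int) (i : Nat) => (List.range n).foldl
        (fun ans j => ans + pvCell Afin i j - pvCell H i j) ans) =
        (fun (ans : Int) (i : Nat) => ans + ∑ j ∈ Finset.range n, (pvCell Afin i j - pvCell H i j)) := by
      funext ans i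
      rw [hswap i, pvFoldl_range_sum]
    rw [hinner, pvFoldl_range_sum]
    simp [pvPhi]
  have hRHS : ((List.range m).map (fun i => ((List.range n).map
      (fun j => pvCell Bfin i j - pvCell H i j)).sum)).sum = pvPhi H m n Bfin := by
    have hinner : (fun (i : Nat) => ((List.range n).map
        (fun j => pvCell Bfin i j - pvCell H i j)).sum) =
        (fun (i : Nat) => ∑ j ∈ Finset.range n, (pvCell Bfin i j - pvCell H i j)) := by
      funext i
      rw [pvSum_map_range]
    rw [hinner, pvSum_map_range]
    rfl
  rw [hLHS, hRHS]
  exact pvPhi_congr hfin
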